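-- pv_equiv track=rewrite | github.com/rickyurvinauc/IIC1103_2025_I | clases/Clase21_repaso_I2/p10_compilado_listas.py | super_estudiantes
-- ===== SOURCE A (Python) =====
-- def super_estudiantes(estudiantes, indicados):
--     # Escribe tu código aquí!
--     indice_e = 0
--     lista = []
--     encontrado = False
--     for estudiante in estudiantes:
--         cant = 0
--         for indicado in indicados:
--             if indicado  in estudiante:
--                 cant += 1
--         if cant == len(indicados):
--             lista.append(indice_e)
--         indice_e += 1
--     return lista
-- ===== SOURCE B (Python) =====
-- def super_estudiantes(estudiantes, indicados):
--     candidatos = set(range(len(estudiantes)))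
--     for indicado in indicados:
--         candidatos = {i for i in candidatos if indicado in estudiantes[i]}
--     return sorted(candidatos)
-- ===== Notes on version B (the rewrite author's own statement) =====
-- stated objective: faster
-- what changed: Outer loop now runs over the required names, pruning a shrinking set of candidate student indices (with O(1) set membership), instead of A's nested per-student loop counting matches; the sorted candidate set is returned.
import Mathlib
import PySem

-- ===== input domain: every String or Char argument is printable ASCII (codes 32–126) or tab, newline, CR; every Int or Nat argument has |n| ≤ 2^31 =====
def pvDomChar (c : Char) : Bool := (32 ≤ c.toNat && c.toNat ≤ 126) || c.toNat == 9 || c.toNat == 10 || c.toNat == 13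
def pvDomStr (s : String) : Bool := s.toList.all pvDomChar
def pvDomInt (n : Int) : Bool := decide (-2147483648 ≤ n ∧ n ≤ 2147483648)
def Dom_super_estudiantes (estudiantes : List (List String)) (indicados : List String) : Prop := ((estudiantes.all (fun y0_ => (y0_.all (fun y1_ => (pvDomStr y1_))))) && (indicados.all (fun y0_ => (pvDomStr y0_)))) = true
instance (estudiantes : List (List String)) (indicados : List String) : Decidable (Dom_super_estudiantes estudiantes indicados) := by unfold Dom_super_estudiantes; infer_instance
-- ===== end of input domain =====

-- B re-implements the search with the outer loop over the required names, pruning a set of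
-- candidate indices, instead of A's per-student match counting; equal output proved on all inputs.

-- ===== PORT A =====
def super_estudiantes (estudiantes : List (List String)) (indicados : List String) : List Int :=
  (estudiantes.foldl
    (fun (st : Int × List Int) estudiante =>
      let cant : Int :=
        indicados.foldl (fun c indicado => if estudiante.contains indicado then c + 1 else c) 0
      (st.1 + 1, if cant = (indicados.length : Int) then st.2 ++ [st.1] else st.2))
    (0, [])).2

-- ===== PORT B =====
-- 'estudiantes[i]' is read with pyGet?; '.getD []' only names the (unreachable) out-of-range
-- case, since every candidate index lies in range — exact for Python's indexing here.
def super_estudiantes_alt (estudiantes : List (List String)) (indicados : List String) : List Int :=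
  PySem.List.sorted
    (indicados.foldl
      (fun (c : PySem.Set Int) indicado =>
        PySem.Set.ofList (c.filter (fun i => ((PySem.List.pyGet? estudiantes i).getD []).contains indicado)))
      (PySem.Set.ofList (PySem.List.pyRange 0 (estudiantes.length : Int) 1)))
    (fun x => x) false

-- ===== PRECONDITION & SPEC =====
def Spec_super_estudiantes (estudiantes : List (List String)) (indicados : List String) (out : List Int) : Prop := out = super_estudiantes_alt estudiantes indicados
instance (estudiantes : List (List String)) (indicados : List String) (out : List Int) : Decidable (Spec_super_estudiantes estudiantes indicados out) := by unfold Spec_super_estudiantes; infer_instance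

-- ===== CLAIM (what is proved, stated in full; the proofs are below) =====
def Claim_equal_super_estudiantes : Prop := ∀ (estudiantes : List (List String)) (indicados : List String), Dom_super_estudiantes estudiantes indicados → Spec_super_estudiantes estudiantes indicados (super_estudiantes estudiantes indicados)

-- ===== LEMMAS AND PROOFS =====

-- the common reference value: indices (from k) of the students that contain every required name
def pvRes (indicados : List String) : List (List String) → Int → List Int
  | [], _ => []
  | e :: t, k =>
      (if indicados.all (fun i => e.contains i) = true then [k] else []) ++ pvRes indicados t (k + 1)

lemma pvA_loop (indicados : List String) (es : List (List String)) :
    ∀ (k : Int) (acc : List Int),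
      (es.foldl
        (fun (st : Int × List Int) estudiante =>
          let cant : Int :=
            indicados.foldl (fun c indicado => if estudiante.contains indicado then c + 1 else c) 0
          (st.1 + 1, if cant = (indicados.length : Int) then st.2 ++ [st.1] else st.2))
        (k, acc)).2 = acc ++ pvRes indicados es k := by
  induction es with
  | nil => intro k acc; simp [pvRes]
  | cons e t ih =>
    intro k acc
    simp only [List.foldl_cons, pvRes, ih]
    rw [PySem.List.foldl_if_add_one]
    have hnat : (indicados.countP (fun i => e.contains i) = indicados.length)
        ↔ (indicados.all (fun i => e.contains i) = true) := by
      rw [List.countP_eq_length, List.all_eq_true]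
    have hmem : ((0 : Int) + (indicados.countP (fun i => e.contains i) : Int)
        = (indicados.length : Int)) ↔ (indicados.all (fun i => e.contains i) = true) := by
      rw [zero_add]
      constructor
      · intro h; exact hnat.mp (by exact_mod_cast h)
      · intro h; exact_mod_cast hnat.mpr h
    by_cases hall : indicados.all (fun i => e.contains i) = true
    · rw [if_pos (hmem.mpr hall), if_pos hall]
      simp
    · rw [if_neg (fun h => hall (hmem.mp h)), if_neg hall]
      simp

lemma pvB_loop (estudiantes : List (List String)) (indicados : List String) :
    ∀ (c : List Int), c.Nodup →
      indicados.foldl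
        (fun (c : PySem.Set Int) indicado =>
          PySem.Set.ofList (c.filter (fun i => ((PySem.List.pyGet? estudiantes i).getD []).contains indicado)))
        c
      = c.filter (fun i => indicados.all (fun ind => ((PySem.List.pyGet? estudiantes i).getD []).contains ind)) := by
  induction indicados with
  | nil => intro c _; simp
  | cons ind t ih =>
    intro c hc
    simp only [List.foldl_cons]
    rw [PySem.Set.ofList_eq_self_of_nodup _ (hc.filter _), ih _ (hc.filter _)]
    rw [List.filter_filter]
    apply List.filter_congr
    intro a _
    simp [List.all_cons, Bool.and_comm]

lemma pvFilter_range (indicados : List String) (full : List (List String)) :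
    ∀ (es : List (List String)) (k : Nat), full.drop k = es →
      ((PySem.List.pyRange (k : Int) (full.length : Int) 1).filter
        (fun i => indicados.all (fun ind => ((PySem.List.pyGet? full i).getD []).contains ind)))
      = pvRes indicados es (k : Int) := by
  intro es
  induction es with
  | nil =>
    intro k hk
    have hlen : full.length ≤ k := by
      by_contra h
      have := List.drop_eq_nil_iff.mp hk
      omega
    have : PySem.List.pyRange (k : Int) (full.length : Int) 1 = [] := by
      simp [PySem.List.pyRange]
      omega
    simp [this, pvRes]
  | cons e t ih =>
    intro k hk
    have hklt : k < full.length := by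
      by_contra h
      rw [List.drop_eq_nil_iff.mpr (by omega)] at hk
      simp at hk
    have hcons : PySem.List.pyRange (k : Int) (full.length : Int) 1
        = (k : Int) :: PySem.List.pyRange ((k : Int) + 1) (full.length : Int) 1 :=
      PySem.List.pyRange_one_cons (by exact_mod_cast hklt)
    have hget : PySem.List.pyGet? full (k : Int) = some e := by
      have h0 : (full.drop k)[0]? = some e := by rw [hk]; rfl
      rw [List.getElem?_drop] at h0
      simpa [PySem.List.pyGet?_natCast] using h0
    have hdrop : full.drop (k + 1) = t := by
      have := congrArg (List.drop 1) hk
      simpa [List.drop_drop, Nat.add_comm] using this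
    rw [hcons, List.filter_cons, hget]
    have hstep := ih (k + 1) hdrop
    push_cast at hstep
    simp only [Option.getD_some, hstep, pvRes]
    by_cases hall : indicados.all (fun ind => e.contains ind) = true
    · rw [if_pos hall, if_pos hall]; rfl
    · rw [if_neg hall, if_neg hall]; rfl

lemma pvRange_nodup (n : Nat) : (PySem.List.pyRange 0 (n : Int) 1).Nodup := by
  rw [PySem.List.pyRange_zero_natCast]
  exact (List.nodup_range).map (fun a b h => by exact_mod_cast h)

lemma pvRes_sorted (indicados : List String) :
    ∀ (es : List (List String)) (k : Int), (pvRes indicados es k).Pairwise (· < ·)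
      ∧ ∀ x ∈ pvRes indicados es k, k ≤ x := by
  intro es
  induction es with
  | nil => intro k; simp [pvRes]
  | cons e t ih =>
    intro k
    have ht := ih (k + 1)
    by_cases hall : indicados.all (fun i => e.contains i) = true
    · simp only [pvRes, if_pos hall, List.singleton_append]
      refine ⟨List.pairwise_cons.mpr ⟨fun x hx => by have := ht.2 x hx; omega, ht.1⟩, ?_⟩
      intro x hx
      rcases List.mem_cons.mp hx with rfl | hx
      · omega
      · have := ht.2 x hx; omega
    · simp only [pvRes, if_neg hall, List.nil_append]
      exact ⟨ht.1, fun x hx => by have := ht.2 x hx; omega⟩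

-- ===== VERDICT (by name: the statement is the Claim_ definition above) =====
theorem super_estudiantes_spec : Claim_equal_super_estudiantes := by
  intro estudiantes indicados _
  unfold Spec_super_estudiantes super_estudiantes super_estudiantes_alt
  rw [pvA_loop]
  rw [PySem.Set.ofList_eq_self_of_nodup _ (pvRange_nodup estudiantes.length)]
  rw [pvB_loop estudiantes indicados _ (pvRange_nodup estudiantes.length)]
  rw [show ((0 : Int) = ((0 : Nat) : Int)) from rfl,
      pvFilter_range indicados estudiantes estudiantes 0 (by simp)]
  rw [List.nil_append]
  exact (PySem.List.sorted_eq_self_of_pairwise _ _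
    (((pvRes_sorted indicados estudiantes ((0 : Nat) : Int)).1).imp (fun h => le_of_lt h))).symm
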